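-- pv_equiv track=rewrite | github.com/Zaclin-GIT/MDB | MDB_Parser/wrapper_generator.py | resolve_using_conflicts
-- ===== SOURCE A (Python) =====
-- def detect_ambiguous_types(type_refs: set, candidate_namespaces: set,
--                            ns_type_map: dict, current_ns: str) -> dict:
--     """
--     Detect which types would be ambiguous if all candidate namespaces were imported.
--     Returns dict of type_name -> list of namespaces that define it.
--     """
--     ambiguous = {}
--
--     for type_name in type_refs:
--         defining_namespaces = []
--
--         # Check current namespace first
--         if current_ns in ns_type_map and type_name in ns_type_map[current_ns]:
--             defining_namespaces.append(current_ns)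
--
--         # Check candidate namespaces
--         for ns in candidate_namespaces:
--             if ns in ns_type_map and type_name in ns_type_map[ns]:
--                 if ns not in defining_namespaces:
--                     defining_namespaces.append(ns)
--
--         # If defined in multiple namespaces (including current), it's ambiguous
--         if len(defining_namespaces) > 1:
--             ambiguous[type_name] = defining_namespaces
--
--     return ambiguous
--
-- def resolve_using_conflicts(type_refs: set, candidate_namespaces: set,
--                             ns_type_map: dict, current_ns: str,
--                             core_namespaces: set) -> tuple:
--     """
--     Resolve conflicts between namespaces. Returns (safe_namespaces, excluded_namespaces).
--
--     Priority order:
--     1. Core Unity namespaces (always included)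
--     2. Namespaces that provide unique types we need
--     3. Exclude namespaces that only add ambiguity
--     """
--     safe = set()
--     excluded = set()
--
--     # Always include core namespaces
--     safe.update(core_namespaces)
--
--     # Find ambiguous types
--     all_candidates = candidate_namespaces | core_namespaces
--     ambiguous = detect_ambiguous_types(type_refs, all_candidates, ns_type_map, current_ns)
--
--     # For each candidate namespace, check if it's worth including
--     for ns in candidate_namespaces:
--         if ns in core_namespaces:
--             continue  # Already included
--         if ns == current_ns:
--             continue  # Skip self
--         if ns not in ns_type_map:
--             continue
--
--         types_in_ns = ns_type_map[ns]
--         types_we_need = type_refs & types_in_ns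
--
--         if not types_we_need:
--             # This namespace provides no types we use - skip it
--             excluded.add(ns)
--             continue
--
--         # Check if any needed types would cause ambiguity
--         causes_ambiguity = False
--         for type_name in types_we_need:
--             if type_name in ambiguous:
--                 # This type is ambiguous - check if this namespace is lower priority
--                 other_namespaces = [n for n in ambiguous[type_name] if n != ns]
--
--                 # Prefer core namespaces over generated ones
--                 core_has_it = any(n in core_namespaces for n in other_namespaces)
--                 if core_has_it:
--                     causes_ambiguity = True
--                     break
--
--                 # Prefer current namespace over imported ones
--                 if current_ns in other_namespaces:
--                     causes_ambiguity = True
--                     break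
--
--         if causes_ambiguity:
--             excluded.add(ns)
--         else:
--             safe.add(ns)
--
--     return safe, excluded
-- ===== SOURCE B (Python) =====
-- def resolve_using_conflicts(type_refs: set, candidate_namespaces: set,
--                             ns_type_map: dict, current_ns: str,
--                             core_namespaces: set) -> tuple:
--     """Single pass, no ambiguity dict: a candidate namespace is safe iff it provides
--     some needed type and none of its needed types is also provided by the current
--     namespace or by a core namespace (the 'blocked' type pool)."""
--     blocked = set(ns_type_map.get(current_ns, ()))
--     for n in core_namespaces:
--         blocked |= set(ns_type_map.get(n, ()))
--     safe = set(core_namespaces)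
--     excluded = set()
--     for ns in candidate_namespaces:
--         if ns in core_namespaces or ns == current_ns or ns not in ns_type_map:
--             continue
--         needed = type_refs & ns_type_map[ns]
--         if needed and needed.isdisjoint(blocked):
--             safe.add(ns)
--         else:
--             excluded.add(ns)
--     return safe, excluded
-- ===== Notes on version B (the rewrite author's own statement) =====
-- stated objective: faster
-- what changed: B drops the quadratic detect_ambiguous_types pass entirely: it builds one 'blocked' pool of types provided by the current or a core namespace, then classifies each candidate by intersecting its needed types with that pool, instead of scanning all candidate namespaces per type reference to build an ambiguity dict.
import Mathlib
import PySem

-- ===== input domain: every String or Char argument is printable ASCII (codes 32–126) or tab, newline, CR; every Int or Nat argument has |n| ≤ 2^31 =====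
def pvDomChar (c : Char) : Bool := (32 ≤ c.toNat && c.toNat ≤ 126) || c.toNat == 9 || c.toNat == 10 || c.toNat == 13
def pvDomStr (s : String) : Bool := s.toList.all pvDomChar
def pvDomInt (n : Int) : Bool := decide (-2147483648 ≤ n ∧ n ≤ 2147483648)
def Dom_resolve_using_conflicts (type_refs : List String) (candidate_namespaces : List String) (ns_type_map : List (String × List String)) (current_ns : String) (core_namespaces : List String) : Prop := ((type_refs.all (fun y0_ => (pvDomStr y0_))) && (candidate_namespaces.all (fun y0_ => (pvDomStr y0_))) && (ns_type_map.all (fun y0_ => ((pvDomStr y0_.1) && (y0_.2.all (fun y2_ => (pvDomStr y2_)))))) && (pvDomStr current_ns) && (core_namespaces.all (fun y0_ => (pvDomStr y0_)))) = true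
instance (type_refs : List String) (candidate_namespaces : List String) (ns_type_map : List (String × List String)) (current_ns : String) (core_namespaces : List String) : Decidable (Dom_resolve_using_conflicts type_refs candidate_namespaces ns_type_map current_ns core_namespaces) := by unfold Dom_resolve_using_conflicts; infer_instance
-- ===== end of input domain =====

-- B replaces A's ambiguity-dict construction (a scan of all candidate namespaces per type
-- reference) by one precomputed pool of types provided by the current/core namespaces and a
-- single intersection test per candidate; objective: faster. Return values only (no mutation).

-- ===== PORT A =====
-- helper: the 'defining_namespaces' list detect_ambiguous_types builds for one type_name
def pvDefining (ns_type_map : PySem.Dict String (List String)) (current_ns : String)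
    (candidate_namespaces : List String) (type_name : String) : List String :=
  let d0 : List String :=
    if ns_type_map.contains current_ns && (ns_type_map.getD current_ns []).contains type_name
    then [current_ns] else []
  candidate_namespaces.foldl (fun dns ns =>
    if ns_type_map.contains ns && (ns_type_map.getD ns []).contains type_name then
      if dns.contains ns then dns else dns ++ [ns]
    else dns) d0

def detect_ambiguous_types (type_refs : PySem.Set String) (candidate_namespaces : PySem.Set String)
    (ns_type_map : PySem.Dict String (List String)) (current_ns : String) :
    PySem.Dict String (List String) :=
  type_refs.foldl (fun amb type_name =>
    let ds := pvDefining ns_type_map current_ns candidate_namespaces type_name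
    if 1 < ds.length then amb.insert type_name ds else amb) PySem.Dict.empty

def resolve_using_conflicts (type_refs : List String) (candidate_namespaces : List String) (ns_type_map : List (String × List String)) (current_ns : String) (core_namespaces : List String) : List String × List String :=
  let tr : PySem.Set String := PySem.Set.ofList type_refs
  let cand : PySem.Set String := PySem.Set.ofList candidate_namespaces
  let core : PySem.Set String := PySem.Set.ofList core_namespaces
  let m : PySem.Dict String (List String) := PySem.Dict.ofList ns_type_map
  let safe0 : PySem.Set String := PySem.Set.update PySem.Set.empty core
  let all_candidates : PySem.Set String := PySem.Set.union cand core
  let ambiguous := detect_ambiguous_types tr all_candidates m current_ns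
  cand.foldl (fun (p : PySem.Set String × PySem.Set String) ns =>
    if core.contains ns then p
    else if ns == current_ns then p
    else if !(m.contains ns) then p
    else
      let types_we_need : PySem.Set String := PySem.Set.inter tr (m.getD ns [])
      if types_we_need.isEmpty then (p.1, PySem.Set.add p.2 ns)
      else
        let causes_ambiguity := types_we_need.any (fun type_name =>
          match ambiguous.get? type_name with
          | none => false
          | some ds =>
            let others := ds.filter (fun n => n != ns)
            (others.any (fun n => core.contains n)) || others.contains current_ns)
        if causes_ambiguity then (p.1, PySem.Set.add p.2 ns) else (PySem.Set.add p.1 ns, p.2))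
    (safe0, PySem.Set.empty)

-- ===== PORT B =====
def resolve_using_conflicts_alt (type_refs : List String) (candidate_namespaces : List String) (ns_type_map : List (String × List String)) (current_ns : String) (core_namespaces : List String) : List String × List String :=
  let m : PySem.Dict String (List String) := PySem.Dict.ofList ns_type_map
  let blocked : PySem.Set String :=
    core_namespaces.foldl (fun b n => PySem.Set.update b (m.getD n []))
      (PySem.Set.ofList (m.getD current_ns []))
  let tr : PySem.Set String := PySem.Set.ofList type_refs
  let core : PySem.Set String := PySem.Set.ofList core_namespaces
  (PySem.Set.ofList candidate_namespaces).foldl (fun (p : PySem.Set String × PySem.Set String) ns =>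
    if core.contains ns || ns == current_ns || !(m.contains ns) then p
    else
      let needed : PySem.Set String := PySem.Set.inter tr (m.getD ns [])
      if !needed.isEmpty && PySem.Set.isdisjoint needed blocked then
        (PySem.Set.add p.1 ns, p.2)
      else (p.1, PySem.Set.add p.2 ns))
    (PySem.Set.ofList core_namespaces, PySem.Set.empty)

-- ===== PRECONDITION & SPEC =====
def Spec_resolve_using_conflicts (type_refs : List String) (candidate_namespaces : List String) (ns_type_map : List (String × List String)) (current_ns : String) (core_namespaces : List String) (out : List String × List String) : Prop := out = resolve_using_conflicts_alt type_refs candidate_namespaces ns_type_map current_ns core_namespaces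
instance (type_refs : List String) (candidate_namespaces : List String) (ns_type_map : List (String × List String)) (current_ns : String) (core_namespaces : List String) (out : List String × List String) : Decidable (Spec_resolve_using_conflicts type_refs candidate_namespaces ns_type_map current_ns core_namespaces out) := by unfold Spec_resolve_using_conflicts; infer_instance

-- ===== CLAIM (what is proved, stated in full; the proofs are below) =====
def Claim_equal_resolve_using_conflicts : Prop := ∀ (type_refs : List String) (candidate_namespaces : List String) (ns_type_map : List (String × List String)) (current_ns : String) (core_namespaces : List String), Dom_resolve_using_conflicts type_refs candidate_namespaces ns_type_map current_ns core_namespaces → Spec_resolve_using_conflicts type_refs candidate_namespaces ns_type_map current_ns core_namespaces (resolve_using_conflicts type_refs candidate_namespaces ns_type_map current_ns core_namespaces)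

-- ===== LEMMAS AND PROOFS =====

-- membership in the per-type 'defining_namespaces' list
theorem pvDefining_mem (m : PySem.Dict String (List String)) (cur : String)
    (cands : List String) (t n : String) :
    n ∈ pvDefining m cur cands t ↔
      (n = cur ∨ n ∈ cands) ∧ m.contains n = true ∧ t ∈ m.getD n [] := by
  have aux : ∀ (l : List String) (acc : List String),
      n ∈ l.foldl (fun dns ns =>
        if m.contains ns && (m.getD ns []).contains t then
          if dns.contains ns then dns else dns ++ [ns]
        else dns) acc ↔
      n ∈ acc ∨ (n ∈ l ∧ m.contains n = true ∧ t ∈ m.getD n []) := by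
    intro l
    induction l with
    | nil => simp
    | cons x xs ih =>
      intro acc
      simp only [List.foldl_cons, ih]
      by_cases hx : (m.contains x && (m.getD x []).contains t) = true
      · by_cases hmem : acc.contains x = true
        · rw [if_pos hx, if_pos hmem]
          constructor
          · rintro (h | h)
            · exact Or.inl h
            · exact Or.inr ⟨List.mem_cons_of_mem _ h.1, h.2⟩
          · rintro (h | ⟨hl, h2⟩)
            · exact Or.inl h
            · rcases List.mem_cons.mp hl with rfl | hl
              · exact Or.inl (by simpa using hmem)
              · exact Or.inr ⟨hl, h2⟩
        · rw [if_pos hx, if_neg hmem]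
          simp only [List.mem_append, List.mem_singleton]
          constructor
          · rintro ((h | rfl) | h)
            · exact Or.inl h
            · refine Or.inr ⟨List.mem_cons_self, ?_⟩
              simpa using hx
            · exact Or.inr ⟨List.mem_cons_of_mem _ h.1, h.2⟩
          · rintro (h | ⟨hl, h2⟩)
            · exact Or.inl (Or.inl h)
            · rcases List.mem_cons.mp hl with rfl | hl
              · exact Or.inl (Or.inr rfl)
              · exact Or.inr ⟨hl, h2⟩
      · rw [if_neg hx]
        constructor
        · rintro (h | h)
          · exact Or.inl h
          · exact Or.inr ⟨List.mem_cons_of_mem _ h.1, h.2⟩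
        · rintro (h | ⟨hl, h2⟩)
          · exact Or.inl h
          · rcases List.mem_cons.mp hl with rfl | hl
            · exfalso; apply hx; simp [h2.1, h2.2]
            · exact Or.inr ⟨hl, h2⟩
  unfold pvDefining
  simp only []
  rw [aux]
  constructor
  · rintro (h | h)
    · simp only [List.mem_ite_nil_right, List.mem_singleton, Bool.and_eq_true,
        List.contains_eq_mem, decide_eq_true_eq] at h
      obtain ⟨⟨hc1, hc2⟩, rfl⟩ := h
      exact ⟨Or.inl rfl, hc1, hc2⟩
    · exact ⟨Or.inr h.1, h.2⟩
  · rintro ⟨hcur | hc, h2, h3⟩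
    · subst hcur
      left
      simp [h2, h3]
    · exact Or.inr ⟨hc, h2, h3⟩

-- the ambiguity dict A builds, characterised by get?
theorem detect_get? (trl allc : List String) (m : PySem.Dict String (List String))
    (cur x : String) :
    (detect_ambiguous_types trl allc m cur).get? x =
      if x ∈ trl ∧ 1 < (pvDefining m cur allc x).length
      then some (pvDefining m cur allc x) else none := by
  have aux : ∀ (l : List String) (amb : PySem.Dict String (List String)),
      (l.foldl (fun amb tn =>
        if 1 < (pvDefining m cur allc tn).length then amb.insert tn (pvDefining m cur allc tn)
        else amb) amb).get? x =
      if x ∈ l ∧ 1 < (pvDefining m cur allc x).length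
      then some (pvDefining m cur allc x) else amb.get? x := by
    intro l
    induction l with
    | nil => simp
    | cons a l ih =>
      intro amb
      simp only [List.foldl_cons, ih]
      by_cases hxl : x ∈ l ∧ 1 < (pvDefining m cur allc x).length
      · simp only [hxl]
        have : x ∈ a :: l ∧ 1 < (pvDefining m cur allc x).length :=
          ⟨List.mem_cons_of_mem _ hxl.1, hxl.2⟩
        simp [this]
      · simp only [hxl, if_false]
        by_cases ha : 1 < (pvDefining m cur allc a).length
        · simp only [ha, if_true]
          rw [PySem.Dict.get?_insert]
          by_cases hxa : x = a
          · subst hxa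
            simp [ha]
          · simp only [hxa, if_false]
            have hns : ¬ (x ∈ a :: l ∧ 1 < (pvDefining m cur allc x).length) := by
              intro ⟨h1, h2⟩
              rcases List.mem_cons.mp h1 with rfl | h1
              · exact hxa rfl
              · exact hxl ⟨h1, h2⟩
            simp only [List.mem_cons]
            rw [if_neg (by simpa [List.mem_cons] using hns)]
        · simp only [ha, if_false]
          have hns : ¬ (x ∈ a :: l ∧ 1 < (pvDefining m cur allc x).length) := by
            intro ⟨h1, h2⟩
            rcases List.mem_cons.mp h1 with rfl | h1
            · exact ha h2
            · exact hxl ⟨h1, h2⟩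
          rw [if_neg hns]
  unfold detect_ambiguous_types
  simp only []
  rw [aux]
  by_cases h : x ∈ trl ∧ 1 < (pvDefining m cur allc x).length <;> simp [h]

-- a key outside the dict looks up to the default
theorem getD_nil_of_not_contains (m : PySem.Dict String (List String)) (k : String)
    (h : m.contains k = false) : m.getD k [] = [] := by
  have h2 : m.get? k = none := by
    have := PySem.Dict.contains_eq_isSome_get? (d := m) (k := k)
    rw [h] at this
    exact Option.not_isSome_iff_eq_none.mp (by simp [← this])
  simp [PySem.Dict.getD_eq_get?_getD, h2]

theorem contains_of_mem_getD (m : PySem.Dict String (List String)) (k t : String)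
    (h : t ∈ m.getD k []) : m.contains k = true := by
  by_cases hc : m.contains k = true
  · exact hc
  · rw [getD_nil_of_not_contains m k (by simpa using hc)] at h
    simp at h

theorem two_mem_one_lt {l : List String} {a b : String} (ha : a ∈ l) (hb : b ∈ l)
    (hne : a ≠ b) : 1 < l.length := by
  rcases l with _ | ⟨x, _ | ⟨y, tl⟩⟩
  · simp at ha
  · rw [List.mem_singleton] at ha hb
    exact absurd (ha.trans hb.symm) hne
  · simp only [List.length_cons]
    omega

-- membership in B's blocked pool
theorem blocked_mem (m : PySem.Dict String (List String)) (cur : String)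
    (corel : List String) (t : String) :
    (t ∈ corel.foldl (fun b n => PySem.Set.update b (m.getD n []))
        (PySem.Set.ofList (m.getD cur []))) ↔
      t ∈ m.getD cur [] ∨ ∃ n ∈ corel, t ∈ m.getD n [] := by
  have aux : ∀ (l : List String) (b : PySem.Set String),
      t ∈ l.foldl (fun b n => PySem.Set.update b (m.getD n [])) b ↔
        t ∈ b ∨ ∃ n ∈ l, t ∈ m.getD n [] := by
    intro l
    induction l with
    | nil => simp
    | cons x xs ih =>
      intro b
      simp only [List.foldl_cons, ih, PySem.Set.mem_update]
      constructor
      · rintro ((h | h) | ⟨n, hn, h2⟩)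
        · exact Or.inl h
        · exact Or.inr ⟨x, List.mem_cons_self, h⟩
        · exact Or.inr ⟨n, List.mem_cons_of_mem _ hn, h2⟩
      · rintro (h | ⟨n, hn, h2⟩)
        · exact Or.inl (Or.inl h)
        · rcases List.mem_cons.mp hn with rfl | hn
          · exact Or.inl (Or.inr h2)
          · exact Or.inr ⟨n, hn, h2⟩
  rw [aux]
  simp [PySem.Set.mem_ofList]

-- the heart: A's per-type ambiguity test equals membership in B's blocked pool
theorem causes_iff (ns_type_map : List (String × List String)) (current_ns : String)
    (type_refs candidate_namespaces core_namespaces : List String) (ns t : String)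
    (hns : ns ∈ PySem.Set.union (PySem.Set.ofList candidate_namespaces) (PySem.Set.ofList core_namespaces))
    (hcore : ns ∉ core_namespaces) (hcur : ns ≠ current_ns)
    (ht : t ∈ PySem.Set.ofList type_refs)
    (htns : t ∈ (PySem.Dict.ofList ns_type_map).getD ns []) :
    ((match (detect_ambiguous_types (PySem.Set.ofList type_refs)
        (PySem.Set.union (PySem.Set.ofList candidate_namespaces) (PySem.Set.ofList core_namespaces))
        (PySem.Dict.ofList ns_type_map) current_ns).get? t with
      | none => false
      | some ds =>
        ((ds.filter (fun n => n != ns)).any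
            (fun n => (PySem.Set.ofList core_namespaces).contains n)) ||
          (ds.filter (fun n => n != ns)).contains current_ns) = true) ↔
      (t ∈ (PySem.Dict.ofList ns_type_map).getD current_ns [] ∨
        ∃ n ∈ core_namespaces, t ∈ (PySem.Dict.ofList ns_type_map).getD n []) := by
  set m := PySem.Dict.ofList ns_type_map with hm
  set allc := PySem.Set.union (PySem.Set.ofList candidate_namespaces) (PySem.Set.ofList core_namespaces) with hallc
  have hns_def : ns ∈ pvDefining m current_ns allc t :=
    (pvDefining_mem m current_ns allc t ns).mpr
      ⟨Or.inr hns, contains_of_mem_getD m ns t htns, htns⟩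
  rw [detect_get?]
  by_cases hlen : t ∈ (PySem.Set.ofList type_refs : List String) ∧ 1 < (pvDefining m current_ns allc t).length
  · rw [if_pos hlen]
    simp only [Bool.or_eq_true, List.any_eq_true, List.mem_filter, List.contains_eq_mem,
      decide_eq_true_eq, PySem.Set.contains_iff, PySem.Set.mem_ofList, bne_iff_ne, ne_eq]
    constructor
    · rintro (⟨n, ⟨hnd, hne⟩, hnc⟩ | ⟨hcd, hne⟩)
      · rcases (pvDefining_mem m current_ns allc t n).mp hnd with ⟨_, _, h3⟩
        exact Or.inr ⟨n, hnc, h3⟩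
      · rcases (pvDefining_mem m current_ns allc t current_ns).mp hcd with ⟨_, _, h3⟩
        exact Or.inl h3
    · rintro (h | ⟨n, hn, h2⟩)
      · right
        refine ⟨(pvDefining_mem m current_ns allc t current_ns).mpr
          ⟨Or.inl rfl, contains_of_mem_getD m current_ns t h, h⟩, ?_⟩
        exact fun hh => hcur hh.symm
      · left
        have hnall : n ∈ (allc : List String) := by
          rw [hallc]
          rw [PySem.Set.mem_union]
          exact Or.inr (by rw [PySem.Set.mem_ofList]; exact hn)
        refine ⟨n, ⟨(pvDefining_mem m current_ns allc t n).mpr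
          ⟨Or.inr hnall, contains_of_mem_getD m n t h2, h2⟩, ?_⟩, hn⟩
        intro hh
        exact hcore (hh ▸ hn)
  · rw [if_neg hlen]
    simp only [Bool.false_eq_true, false_iff]
    rintro (h | ⟨n, hn, h2⟩)
    · apply hlen
      refine ⟨ht, ?_⟩
      have hcd : current_ns ∈ pvDefining m current_ns allc t :=
        (pvDefining_mem m current_ns allc t current_ns).mpr
          ⟨Or.inl rfl, contains_of_mem_getD m current_ns t h, h⟩
      exact two_mem_one_lt hns_def hcd hcur
    · apply hlen
      refine ⟨ht, ?_⟩
      have hnall : n ∈ (allc : List String) := by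
        rw [hallc, PySem.Set.mem_union]
        exact Or.inr (by rw [PySem.Set.mem_ofList]; exact hn)
      have hnd : n ∈ pvDefining m current_ns allc t :=
        (pvDefining_mem m current_ns allc t n).mpr
          ⟨Or.inr hnall, contains_of_mem_getD m n t h2, h2⟩
      exact two_mem_one_lt hns_def hnd (fun hh => hcore (hh ▸ hn))

-- ===== VERDICT (by name: the statement is the Claim_ definition above) =====
theorem resolve_using_conflicts_spec : Claim_equal_resolve_using_conflicts := by
  intro type_refs candidate_namespaces ns_type_map current_ns core_namespaces _
  unfold Spec_resolve_using_conflicts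
  unfold resolve_using_conflicts resolve_using_conflicts_alt
  simp only []
  set m := PySem.Dict.ofList ns_type_map with hm
  set tr := PySem.Set.ofList type_refs with htr
  set cand := PySem.Set.ofList candidate_namespaces with hcand
  set core := PySem.Set.ofList core_namespaces with hcore
  have hinit : (PySem.Set.update PySem.Set.empty core, (PySem.Set.empty : PySem.Set String)) =
      ((PySem.Set.ofList core_namespaces : PySem.Set String), (PySem.Set.empty : PySem.Set String)) := by
    have h := PySem.Set.update_nil_left (core : List String)
    rw [Prod.mk.injEq]
    exact ⟨h.trans (by rw [hcore, PySem.Set.ofList_ofList]), rfl⟩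
  rw [hinit]
  apply PySem.List.foldl_congr_mem
  intro p ns hnsc
  by_cases h1 : core.contains ns = true
  · have hBor : (core.contains ns || ns == current_ns || !m.contains ns) = true := by
      simp only [Bool.or_eq_true]
      exact Or.inl (Or.inl h1)
    rw [if_pos h1, if_pos hBor]
  · by_cases h2 : (ns == current_ns) = true
    · have hBor : (core.contains ns || ns == current_ns || !m.contains ns) = true := by
        simp only [Bool.or_eq_true]
        exact Or.inl (Or.inr h2)
      rw [if_neg h1, if_pos h2, if_pos hBor]
    · by_cases h3 : (!m.contains ns) = true
      · have hBor : (core.contains ns || ns == current_ns || !m.contains ns) = true := by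
          simp only [Bool.or_eq_true]
          exact Or.inr h3
        rw [if_neg h1, if_neg h2, if_pos h3, if_pos hBor]
      · have hBor : ¬ ((core.contains ns || ns == current_ns || !m.contains ns) = true) := by
          simp only [Bool.or_eq_true]
          rintro ((h | h) | h)
          · exact h1 h
          · exact h2 h
          · exact h3 h
        rw [if_neg h1, if_neg h2, if_neg h3, if_neg hBor]
        have hcur : ns ≠ current_ns := by
          intro h
          exact h2 (by simp [h])
        have hcoremem : ns ∉ core_namespaces := by
          intro h
          exact h1 ((PySem.Set.contains_iff _ _).mpr ((PySem.Set.mem_ofList _ _).mpr h))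
        have hnsall : ns ∈ PySem.Set.union cand core := by
          rw [PySem.Set.mem_union]
          exact Or.inl hnsc
        have key : ∀ t ∈ (PySem.Set.inter tr (m.getD ns []) : List String),
            ((match (detect_ambiguous_types tr (PySem.Set.union cand core) m current_ns).get? t with
              | none => false
              | some ds =>
                ((ds.filter (fun n => n != ns)).any (fun n => core.contains n)) ||
                  (ds.filter (fun n => n != ns)).contains current_ns) = true) ↔
              t ∈ core_namespaces.foldl (fun b n => PySem.Set.update b (m.getD n []))
                (PySem.Set.ofList (m.getD current_ns [])) := by
          intro t htm
          rw [blocked_mem]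
          have htm' := (PySem.Set.mem_inter _ _ _).mp htm
          exact causes_iff ns_type_map current_ns type_refs candidate_namespaces
            core_namespaces ns t hnsall hcoremem hcur htm'.1 htm'.2
        by_cases hemp : ((PySem.Set.inter tr (m.getD ns []) : List String)).isEmpty = true
        · have hBand : ¬ ((!(PySem.Set.inter tr (m.getD ns []) : List String).isEmpty &&
              PySem.Set.isdisjoint (PySem.Set.inter tr (m.getD ns []))
                (core_namespaces.foldl (fun b n => PySem.Set.update b (m.getD n []))
                  (PySem.Set.ofList (m.getD current_ns [])))) = true) := by
            simp [hemp]
          rw [if_pos hemp, if_neg hBand]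
        · rw [if_neg hemp]
          have hempf : ((PySem.Set.inter tr (m.getD ns []) : List String)).isEmpty = false := by
            simpa using hemp
          by_cases hA : ((PySem.Set.inter tr (m.getD ns []) : List String)).any (fun type_name =>
              match (detect_ambiguous_types tr (PySem.Set.union cand core) m current_ns).get? type_name with
              | none => false
              | some ds =>
                ((ds.filter (fun n => n != ns)).any (fun n => core.contains n)) ||
                  (ds.filter (fun n => n != ns)).contains current_ns) = true
          · have hB : PySem.Set.isdisjoint (PySem.Set.inter tr (m.getD ns []))
                (core_namespaces.foldl (fun b n => PySem.Set.update b (m.getD n []))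
                  (PySem.Set.ofList (m.getD current_ns []))) = false := by
              obtain ⟨t, htm, hc⟩ := List.any_eq_true.mp hA
              cases hBv : PySem.Set.isdisjoint (PySem.Set.inter tr (m.getD ns []))
                (core_namespaces.foldl (fun b n => PySem.Set.update b (m.getD n []))
                  (PySem.Set.ofList (m.getD current_ns [])))
              · rfl
              · exact absurd ((key t htm).mp hc)
                  ((PySem.Set.isdisjoint_iff _ _).mp hBv t htm)
            have hBand : ¬ ((!(PySem.Set.inter tr (m.getD ns []) : List String).isEmpty &&
                PySem.Set.isdisjoint (PySem.Set.inter tr (m.getD ns []))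
                  (core_namespaces.foldl (fun b n => PySem.Set.update b (m.getD n []))
                    (PySem.Set.ofList (m.getD current_ns [])))) = true) := by
              simp [hB]
            rw [if_pos hA, if_neg hBand]
          · have hB : PySem.Set.isdisjoint (PySem.Set.inter tr (m.getD ns []))
                (core_namespaces.foldl (fun b n => PySem.Set.update b (m.getD n []))
                  (PySem.Set.ofList (m.getD current_ns []))) = true := by
              rw [PySem.Set.isdisjoint_iff]
              intro t htm hb
              exact hA (List.any_eq_true.mpr ⟨t, htm, (key t htm).mpr hb⟩)
            have hBand : ((!(PySem.Set.inter tr (m.getD ns []) : List String).isEmpty &&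
                PySem.Set.isdisjoint (PySem.Set.inter tr (m.getD ns []))
                  (core_namespaces.foldl (fun b n => PySem.Set.update b (m.getD n []))
                    (PySem.Set.ofList (m.getD current_ns [])))) = true) := by
              simp [hempf, hB]
            rw [if_neg hA, if_pos hBand]
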